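-- pv_equiv track=rewrite | github.com/NurzhauganovA/delivery-loggy-test | delivery/api/monitoring.py | _filter_couriers
-- ===== SOURCE A (Python) =====
-- def _filter_couriers(couriers: list) -> list:
--     ids_to_objects = {}
--
--     for courier in couriers:
--         _id = courier['id']
--         if _id not in ids_to_objects:
--             ids_to_objects[_id] = courier
--         else:
--             if courier['ts'] > ids_to_objects[_id]['ts']:
--                 ids_to_objects[_id] = courier
--
--     try:
--         return list(ids_to_objects.values())
--     finally:
--         couriers.clear()
-- ===== SOURCE B (Python) =====
-- def _filter_couriers(couriers: list) -> list:
--     # Group-then-reduce: collect all candidates per id, then take the max-ts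
--     # element of each group (max keeps the earliest on ties, like A's strict >).
--     # Clears the input list like the original (same observable mutation).
--     groups = {}
--     for courier in couriers:
--         groups.setdefault(courier['id'], []).append(courier)
--     try:
--         return [max(g, key=lambda c: c['ts']) for g in groups.values()]
--     finally:
--         couriers.clear()
-- ===== Notes on version B (the rewrite author's own statement) =====
-- stated objective: alternative
-- what changed: Instead of maintaining one running best courier per id, B groups all couriers by id in one pass (dict of lists via setdefault) and then reduces each group with max(key=ts), which keeps the first maximal element exactly like A's strict-> comparison; the input list is cleared as in A.
-- outside the precondition, e.g. on _filter_couriers([{'id': 1}]): A returns [{'id': 1}], B raises KeyError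
import Mathlib
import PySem

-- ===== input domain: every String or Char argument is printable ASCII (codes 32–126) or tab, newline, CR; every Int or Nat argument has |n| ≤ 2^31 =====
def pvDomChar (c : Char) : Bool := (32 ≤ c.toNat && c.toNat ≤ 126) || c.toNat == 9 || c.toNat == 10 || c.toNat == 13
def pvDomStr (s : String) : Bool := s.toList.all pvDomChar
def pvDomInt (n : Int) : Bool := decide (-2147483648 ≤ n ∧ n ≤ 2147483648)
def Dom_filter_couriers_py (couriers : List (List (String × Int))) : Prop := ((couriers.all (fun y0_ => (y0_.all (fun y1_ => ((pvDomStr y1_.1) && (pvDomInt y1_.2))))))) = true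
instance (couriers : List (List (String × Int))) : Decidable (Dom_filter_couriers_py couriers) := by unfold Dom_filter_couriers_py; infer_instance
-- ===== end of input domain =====

-- B groups couriers by id and then takes the max-ts element per group (ties keep the earliest,
-- like A's strict >); equivalence is about the return value — both Pythons also clear the input list.

-- shared subscript helper: courier[k] for the courier dicts (total via default; Pre_ excludes KeyError)
def pvKey (c : List (String × Int)) (k : String) : Int := (PySem.Dict.mk c).getD k 0

-- ===== PORT A =====
-- loop body of A's single pass (running best per id)
def pvAStep (d : PySem.Dict Int (List (String × Int))) (courier : List (String × Int)) :
    PySem.Dict Int (List (String × Int)) :=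
  let i := pvKey courier "id"
  if d.contains i = false then d.insert i courier
  else if pvKey courier "ts" > pvKey (d.getD i []) "ts" then d.insert i courier
  else d

def filter_couriers_py (couriers : List (List (String × Int))) : List (List (String × Int)) :=
  (couriers.foldl pvAStep PySem.Dict.empty).values

-- ===== PORT B =====
-- loop body of B's grouping pass: groups.setdefault(id, []).append(courier)
def pvBStep (d : PySem.Dict Int (List (List (String × Int)))) (c : List (String × Int)) :
    PySem.Dict Int (List (List (String × Int))) :=
  d.modify (pvKey c "id") [] (fun g => g ++ [c])

-- max(g, key=lambda c: c['ts']) (groups are never empty, so the default is never used)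
def pvBest (g : List (List (String × Int))) : List (String × Int) :=
  (PySem.List.max? g (fun c => pvKey c "ts")).getD []

def filter_couriers_py_alt (couriers : List (List (String × Int))) : List (List (String × Int)) :=
  (couriers.foldl pvBStep PySem.Dict.empty).values.map pvBest

-- ===== PRECONDITION & SPEC =====
-- Pre_ excludes couriers missing an "id" or "ts" key: A raises KeyError on a missing "id"
-- (and on a missing "ts" of a duplicated id), and B itself raises KeyError whenever "ts" is missing.
def Pre_filter_couriers_py (couriers : List (List (String × Int))) : Prop :=
  (couriers.all (fun c => (PySem.Dict.mk c).contains "id" && (PySem.Dict.mk c).contains "ts")) = true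
instance (couriers : List (List (String × Int))) : Decidable (Pre_filter_couriers_py couriers) := by
  unfold Pre_filter_couriers_py; infer_instance

def pvWitness_filter_couriers_py : (List (List (String × Int))) :=
  [[("id", 1), ("ts", 5)], [("id", 1), ("ts", 7)], [("id", 2), ("ts", 0)]]

def Spec_filter_couriers_py (couriers : List (List (String × Int))) (out : List (List (String × Int))) : Prop := out = filter_couriers_py_alt couriers
instance (couriers : List (List (String × Int))) (out : List (List (String × Int))) : Decidable (Spec_filter_couriers_py couriers out) := by unfold Spec_filter_couriers_py; infer_instance

-- ===== CLAIM (what is proved, stated in full; the proofs are below) =====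
def Claim_equal_filter_couriers_py : Prop := ∀ (couriers : List (List (String × Int))), Dom_filter_couriers_py couriers → Pre_filter_couriers_py couriers → Spec_filter_couriers_py couriers (filter_couriers_py couriers)

-- ===== LEMMAS AND PROOFS =====

-- invariant linking A's running-best dict to B's group dict
def pvInv (dA : PySem.Dict Int (List (String × Int)))
    (dB : PySem.Dict Int (List (List (String × Int)))) : Prop :=
  dA.items = dB.items.map (fun p => (p.1, pvBest p.2)) ∧
  (∀ p ∈ dB.items, p.2 ≠ []) ∧ dB.keys.Nodup

theorem pvBest_singleton (c : List (String × Int)) : pvBest [c] = c := by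
  simp [pvBest, PySem.List.max?]

theorem pvBest_append (g : List (List (String × Int))) (c : List (String × Int)) (hg : g ≠ []) :
    pvBest (g ++ [c]) =
      if pvKey (pvBest g) "ts" < pvKey c "ts" then c else pvBest g := by
  obtain ⟨m, hm⟩ := Option.ne_none_iff_exists'.1
    (fun h => hg ((PySem.List.max?_eq_none_iff g (fun c => pvKey c "ts")).1 h))
  unfold pvBest
  unfold PySem.List.max? at hm ⊢
  rw [List.foldl_append, hm]
  simp only [List.foldl, Option.getD_some]
  split <;> rfl

theorem pvInv_getD {dA dB} (h : pvInv dA dB) (k : Int) :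
    dA.getD k [] = pvBest (dB.getD k []) := by
  obtain ⟨hitems, -, -⟩ := h
  simp only [PySem.Dict.getD, PySem.Dict.get?, hitems, List.find?_map]
  have hcomp : ((fun p : Int × List (String × Int) => p.1 == k) ∘
      (fun p : Int × List (List (String × Int)) => (p.1, pvBest p.2))) =
      (fun p => p.1 == k) := by
    funext p; rfl
  rw [hcomp]
  cases hf : List.find? (fun p => p.1 == k) dB.items with
  | none => simp [pvBest, PySem.List.max?]
  | some p => simp

theorem pvInv_contains {dA dB} (h : pvInv dA dB) (k : Int) :
    dA.contains k = dB.contains k := by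
  obtain ⟨hitems, -, -⟩ := h
  simp only [PySem.Dict.contains, hitems, List.any_map]
  rfl

theorem pvInv_step {dA dB} (h : pvInv dA dB) (c : List (String × Int)) :
    pvInv (pvAStep dA c) (pvBStep dB c) := by
  obtain ⟨hitems, hne, hnd⟩ := h
  have hB : pvBStep dB c = dB.insert (pvKey c "id") (dB.getD (pvKey c "id") [] ++ [c]) := rfl
  set i := pvKey c "id" with hi
  have hcont := pvInv_contains ⟨hitems, hne, hnd⟩ i
  by_cases hc : dB.contains i = true
  · -- existing id: A may replace, B appends to the group
    have hcA : dA.contains i = true := by rw [hcont]; exact hc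
    -- the group currently stored at i
    obtain ⟨g0, hg0⟩ : ∃ g0, dB.get? i = some g0 := by
      cases hq : dB.get? i with
      | none => rw [(PySem.Dict.get?_eq_none_iff_contains dB i).1 hq] at hc; exact absurd hc (by simp)
      | some g => exact ⟨g, rfl⟩
    have hg0D : dB.getD i [] = g0 := PySem.Dict.getD_of_get?_eq_some dB [] hg0
    have hg0mem : (i, g0) ∈ dB.items := PySem.Dict.mem_items_of_get?_eq_some dB hg0
    have hg0ne : g0 ≠ [] := hne _ hg0mem
    have hgA : dA.getD i [] = pvBest g0 := by
      rw [pvInv_getD ⟨hitems, hne, hnd⟩ i, hg0D]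
    have hBitems : (pvBStep dB c).items =
        dB.items.map (fun p => if p.1 == i then (i, g0 ++ [c]) else p) := by
      rw [hB, hg0D]; exact PySem.Dict.items_insert_of_contains dB _ hc
    have hbest := pvBest_append g0 c hg0ne
    refine ⟨?_, ?_, ?_⟩
    · -- items relation
      unfold pvAStep
      rw [← hi]
      simp only [hcA, Bool.true_eq_false, if_false, hgA]
      rw [hBitems, List.map_map]
      by_cases hlt : pvKey (pvBest g0) "ts" < pvKey c "ts"
      · rw [if_pos (by exact hlt)]
        rw [PySem.Dict.items_insert_of_contains dA _ hcA, hitems, List.map_map]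
        apply List.map_congr_left
        intro p _
        simp only [Function.comp]
        by_cases hp : p.1 == i
        · simp [hp, hbest, hlt]
        · simp [hp]
      · rw [if_neg (by exact hlt)]
        rw [hitems]
        apply List.map_congr_left
        intro p hp
        simp only [Function.comp]
        by_cases hpi : p.1 == i
        · -- nodup keys: the entry at i is exactly (i, g0)
          have hp1 : p.1 = i := by simpa using hpi
          obtain ⟨p1, p2⟩ := p
          have hp1' : p1 = i := by simpa using hp1
          subst hp1'
          have h1 : dB.get? i = some p2 :=
            PySem.Dict.get?_of_mem_items dB hp hnd
          rw [hg0] at h1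
          have h2 : p2 = g0 := (Option.some.inj h1).symm
          rw [h2]
          simp [hbest, hlt]
        · simp [hpi]
    · -- groups stay nonempty
      rw [hBitems]
      intro p hp
      obtain ⟨q, hq, hqe⟩ := List.mem_map.1 hp
      by_cases hqi : q.1 == i
      · rw [if_pos hqi] at hqe; rw [← hqe]; simp
      · rw [if_neg (by simpa using hqi)] at hqe; rw [← hqe]; exact hne _ hq
    · -- keys stay nodup
      rw [hB]; exact PySem.Dict.nodup_keys_insert dB _ _ hnd
  · -- fresh id: both append a new entry
    have hcA : dA.contains i = false := by rw [hcont]; simpa using hc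
    have hg0D : dB.getD i [] = [] :=
      PySem.Dict.getD_of_not_contains dB [] (by simpa using hc)
    refine ⟨?_, ?_, ?_⟩
    · unfold pvAStep
      rw [← hi]
      simp only [hcA, if_true]
      rw [PySem.Dict.items_insert_of_not_contains dA _ hcA, hB, hg0D,
        PySem.Dict.items_insert_of_not_contains dB _ (by simpa using hc)]
      simp [hitems, pvBest_singleton]
    · rw [hB, hg0D, PySem.Dict.items_insert_of_not_contains dB _ (by simpa using hc)]
      intro p hp
      rcases List.mem_append.1 hp with hp | hp
      · exact hne _ hp
      · simp at hp; rw [hp]; simp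
    · rw [hB]; exact PySem.Dict.nodup_keys_insert dB _ _ hnd

theorem pvInv_foldl (l : List (List (String × Int))) {dA dB} (h : pvInv dA dB) :
    pvInv (l.foldl pvAStep dA) (l.foldl pvBStep dB) := by
  induction l generalizing dA dB with
  | nil => exact h
  | cons c t ih => exact ih (pvInv_step h c)

-- ===== VERDICT (by name: the statement is the Claim_ definition above) =====
theorem filter_couriers_py_spec : Claim_equal_filter_couriers_py := by
  intro couriers _ _
  unfold Spec_filter_couriers_py filter_couriers_py filter_couriers_py_alt
  have h0 : pvInv PySem.Dict.empty PySem.Dict.empty :=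
    ⟨rfl, by intro p hp; simp [PySem.Dict.empty] at hp, by simp [PySem.Dict.empty, PySem.Dict.keys]⟩
  obtain ⟨hitems, -, -⟩ := pvInv_foldl couriers h0
  simp only [PySem.Dict.values, hitems, List.map_map]
  rfl
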